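-- pv_equiv track=rewrite | github.com/timothyjjcrow/day-dinkers | backend/routes/ranked.py | _parse_team_ids
-- ===== SOURCE A (Python) =====
-- def _parse_team_ids(raw_ids):
--     if not isinstance(raw_ids, list):
--         return None
--     ids = []
--     for raw in raw_ids:
--         try:
--             value = int(raw)
--         except (TypeError, ValueError):
--             return None
--         if value <= 0:
--             return None
--         ids.append(value)
--     return ids
-- ===== SOURCE B (Python) =====
-- def _parse_team_ids(raw_ids):
--     if not isinstance(raw_ids, list):
--         return None
--     try:
--         ids = [int(raw) for raw in raw_ids]
--     except (TypeError, ValueError):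
--         return None
--     if ids:
--         ordered = sorted(ids)
--         if ordered[0] <= 0:
--             return None
--     return ids
-- ===== Notes on version B (the rewrite author's own statement) =====
-- stated objective: alternative
-- what changed: Replaces A's fused convert-and-validate loop with early returns and an accumulator by a convert-all pass followed by a sort-then-inspect validation: sort a copy and test only the smallest element for positivity.
import Mathlib
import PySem

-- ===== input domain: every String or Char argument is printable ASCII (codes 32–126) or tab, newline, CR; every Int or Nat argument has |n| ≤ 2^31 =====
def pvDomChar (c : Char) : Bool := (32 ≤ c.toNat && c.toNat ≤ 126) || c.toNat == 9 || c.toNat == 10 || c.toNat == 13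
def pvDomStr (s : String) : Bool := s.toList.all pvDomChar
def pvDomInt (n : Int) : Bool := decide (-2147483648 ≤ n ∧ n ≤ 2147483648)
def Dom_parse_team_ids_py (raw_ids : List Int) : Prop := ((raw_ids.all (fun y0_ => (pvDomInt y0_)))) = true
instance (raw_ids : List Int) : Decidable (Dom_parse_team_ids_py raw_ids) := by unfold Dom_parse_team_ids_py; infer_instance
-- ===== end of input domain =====

-- ===== PORT A =====
-- A's loop: accumulate ids, return None as soon as an element is ≤ 0
-- (on List Int inputs int(raw) never raises, so the try/except arm is unreachable).
def parseTeamIdsGoA : List Int → List Int → Option (List Int)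
  | [], ids => some ids.reverse
  | raw :: rest, ids =>
      if raw ≤ 0 then none else parseTeamIdsGoA rest (raw :: ids)

def parse_team_ids_py (raw_ids : List Int) : Option (List Int) :=
  parseTeamIdsGoA raw_ids []

-- ===== PORT B =====
-- B: convert all elements first (int() on an int is the identity), then validate by
-- sorting a copy and testing only the smallest element for positivity; objective: alternative.
def parse_team_ids_py_alt (raw_ids : List Int) : Option (List Int) :=
  let ids := raw_ids.map (fun raw => raw)
  match PySem.List.sorted ids (fun x => x) false with
  | m :: _ => if m ≤ 0 then none else some ids
  | [] => some ids

-- ===== PRECONDITION & SPEC =====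
def Spec_parse_team_ids_py (raw_ids : List Int) (out : Option (List Int)) : Prop := out = parse_team_ids_py_alt raw_ids
instance (raw_ids : List Int) (out : Option (List Int)) : Decidable (Spec_parse_team_ids_py raw_ids out) := by unfold Spec_parse_team_ids_py; infer_instance

-- ===== CLAIM =====
def Claim_equal_parse_team_ids_py : Prop := ∀ (raw_ids : List Int), Dom_parse_team_ids_py raw_ids → Spec_parse_team_ids_py raw_ids (parse_team_ids_py raw_ids)

-- ===== LEMMAS AND PROOFS =====
theorem parseTeamIdsGoA_eq (l : List Int) : ∀ (acc : List Int),
    parseTeamIdsGoA l acc =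
      if l.any (fun v => v ≤ 0) then none else some (acc.reverse ++ l) := by
  induction l with
  | nil => intro acc; simp [parseTeamIdsGoA]
  | cons x xs ih =>
      intro acc
      simp only [parseTeamIdsGoA, List.any_cons]
      by_cases hx : x ≤ 0
      · simp [hx]
      · simp [hx, ih]

theorem alt_eq (raw_ids : List Int) :
    parse_team_ids_py_alt raw_ids =
      if raw_ids.any (fun v => v ≤ 0) then none else some raw_ids := by
  unfold parse_team_ids_py_alt
  simp only [List.map_id']
  rcases hs : PySem.List.sorted raw_ids (fun x => x) false with _ | ⟨m, t⟩
  · have : raw_ids = [] := (PySem.List.sorted_eq_nil_iff _ _ _).1 hs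
    subst this; simp
  · by_cases hm : m ≤ 0
    · have hmem : m ∈ raw_ids := by
        have := PySem.List.mem_sorted (xs := raw_ids) (key := fun x => x) (rev := false) (x := m)
        rw [hs] at this; exact this.1 (List.mem_cons_self ..)
      have : raw_ids.any (fun v => v ≤ 0) = true := by
        simp only [List.any_eq_true]; exact ⟨m, hmem, by simpa using hm⟩
      simp [hm, this]
    · have hall : ∀ y ∈ raw_ids, ¬ y ≤ 0 := by
        intro y hy hy0
        exact hm (le_trans (PySem.List.key_head_sorted_le raw_ids (fun x => x) hs y hy) hy0)
      have : raw_ids.any (fun v => v ≤ 0) = false := by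
        simp only [List.any_eq_false, decide_eq_true_eq]; exact hall
      simp [hm, this]

-- ===== VERDICT =====
theorem parse_team_ids_py_spec : Claim_equal_parse_team_ids_py := by
  intro raw_ids _
  unfold Spec_parse_team_ids_py parse_team_ids_py
  rw [alt_eq, parseTeamIdsGoA_eq]
  simp
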